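-- pv_equiv track=rewrite | github.com/YHaJung/CodeIng | 감성분석/functions.py | token_counter
-- ===== SOURCE A (Python) =====
-- def token_counter(data):
--     from collections import Counter
--     count = Counter()
--     for sentence in data:
--         count.update(sentence)  # string 일때는 .split()추가
--
--     word_set = sorted(count, key=count.get, reverse=True)
--     word_to_int = {word: ii for ii, word in enumerate(word_set, 1)}
--     return word_to_int
-- ===== SOURCE B (Python) =====
-- def token_counter(data):
--     from collections import Counter
--     count = Counter()
--     for sentence in data:
--         count.update(sentence)
--
--     # group words by frequency, preserving first-appearance order inside each bucket
--     buckets = {}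
--     for word, c in count.items():
--         buckets.setdefault(c, []).append(word)
--
--     word_to_int = {}
--     rank = 1
--     for c in sorted(buckets, reverse=True):
--         for word in buckets[c]:
--             word_to_int[word] = rank
--             rank += 1
--     return word_to_int
-- ===== Notes on version B (the rewrite author's own statement) =====
-- stated objective: alternative
-- what changed: Replaces A's single stable sort of all words keyed by their frequency with a group-by-frequency bucket table (words in first-appearance order per bucket) followed by a sort of only the distinct counts, then ranks by walking the buckets in descending count order.
import Mathlib
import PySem

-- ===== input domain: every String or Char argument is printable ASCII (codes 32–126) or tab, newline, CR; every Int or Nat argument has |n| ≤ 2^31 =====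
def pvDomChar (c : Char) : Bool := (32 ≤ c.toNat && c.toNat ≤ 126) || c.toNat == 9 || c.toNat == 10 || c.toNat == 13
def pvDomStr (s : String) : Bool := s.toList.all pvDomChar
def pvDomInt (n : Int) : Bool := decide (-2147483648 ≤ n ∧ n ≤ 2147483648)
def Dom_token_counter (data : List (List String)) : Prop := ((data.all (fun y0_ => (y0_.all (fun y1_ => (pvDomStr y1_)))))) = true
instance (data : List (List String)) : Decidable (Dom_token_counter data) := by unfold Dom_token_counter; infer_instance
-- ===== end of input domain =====

-- B replaces A's stable sort of all words by frequency with a group-by-frequency bucket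
-- table plus a sort of the distinct counts only (alternative decomposition, same result).

-- ===== PORT A =====
-- count.get(word) on a key of the Counter is its count: ported as getD w 0 (exact on the
-- sorted list's elements, which are all keys of the Counter).
def token_counter (data : List (List String)) : List (String × Int) :=
  let count : PySem.Dict String Int :=
    data.foldl (fun count sentence =>
      sentence.foldl (fun count w => count.modify w 0 (· + 1)) count) PySem.Dict.empty
  let word_set : List String := PySem.List.sorted count.keys (fun w => count.getD w 0) true
  let word_to_int : PySem.Dict String Int :=
    (PySem.List.enumerate word_set 1).foldl (fun d p => d.insert p.2 p.1) PySem.Dict.empty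
  word_to_int.items

-- ===== PORT B =====
def token_counter_alt (data : List (List String)) : List (String × Int) :=
  let count : PySem.Dict String Int :=
    data.foldl (fun count sentence =>
      sentence.foldl (fun count w => count.modify w 0 (· + 1)) count) PySem.Dict.empty
  -- buckets.setdefault(c, []).append(word): the stored list becomes its old value ++ [word]
  let buckets : PySem.Dict Int (List String) :=
    count.items.foldl (fun b p => b.modify p.2 [] (fun ws => ws ++ [p.1])) PySem.Dict.empty
  -- for c in sorted(buckets, reverse=True): for word in buckets[c]: word_to_int[word] = rank; rank += 1
  let st : PySem.Dict String Int × Int :=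
    (PySem.List.sorted buckets.keys (fun c => c) true).foldl
      (fun st c => (buckets.getD c []).foldl (fun st w => (st.1.insert w st.2, st.2 + 1)) st)
      (PySem.Dict.empty, 1)
  st.1.items

-- ===== PRECONDITION & SPEC =====
def Spec_token_counter (data : List (List String)) (out : List (String × Int)) : Prop := out = token_counter_alt data
instance (data : List (List String)) (out : List (String × Int)) : Decidable (Spec_token_counter data out) := by unfold Spec_token_counter; infer_instance

-- ===== CLAIM (what is proved, stated in full; the proofs are below) =====
def Claim_equal_token_counter : Prop := ∀ (data : List (List String)), Dom_token_counter data → Spec_token_counter data (token_counter data)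

-- ===== LEMMAS AND PROOFS =====

-- insert a value into a strictly descending list (no-op if already present)
def pvInsD (k : Int) : List Int → List Int
  | [] => [k]
  | c :: cs => if c < k then k :: c :: cs else if c = k then c :: cs else c :: pvInsD k cs

theorem pvMem_insD (k a : Int) (D : List Int) : a ∈ pvInsD k D ↔ a = k ∨ a ∈ D := by
  induction D with
  | nil => simp [pvInsD]
  | cons c cs ih =>
    simp only [pvInsD]
    split_ifs with h1 h2
    · simp
    · subst h2
      simp
    · simp [ih]
      tauto

theorem pvPairwise_insD (k : Int) (D : List Int) (h : D.Pairwise (fun a b => b < a)) :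
    (pvInsD k D).Pairwise (fun a b => b < a) := by
  induction D with
  | nil => simp [pvInsD]
  | cons c cs ih =>
    rw [List.pairwise_cons] at h
    simp only [pvInsD]
    split_ifs with h1 h2
    · refine List.pairwise_cons.2 ⟨?_, List.pairwise_cons.2 ⟨h.1, h.2⟩⟩
      intro b hb
      simp only [List.mem_cons] at hb
      rcases hb with hb | hb
      · omega
      · have := h.1 b hb; omega
    · subst h2
      exact List.pairwise_cons.2 ⟨h.1, h.2⟩
    · refine List.pairwise_cons.2 ⟨?_, ih h.2⟩
      intro b hb
      rcases (pvMem_insD k b cs).1 hb with hb | hb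
      · omega
      · exact h.1 b hb

theorem pvInsertBy_all_before {α : Type} (bef : α → α → Bool) (x : α) (l : List α)
    (h : ∀ y ∈ l, bef x y = true) : PySem.List.insertBy bef x l = x :: l := by
  cases l with
  | nil => rfl
  | cons y ys =>
    have hy := h y (by simp)
    simp [PySem.List.insertBy, hy]

theorem pvInsertBy_append_not {α : Type} (bef : α → α → Bool) (x : α) (l m : List α)
    (h : ∀ y ∈ l, bef x y = false) :
    PySem.List.insertBy bef x (l ++ m) = l ++ PySem.List.insertBy bef x m := by
  induction l with
  | nil => simp
  | cons y ys ih =>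
    have hy := h y (by simp)
    simp only [List.cons_append, PySem.List.insertBy, hy]
    simp [ih (fun z hz => h z (by simp [hz]))]

-- inserting one element into a descending concatenation of key-homogeneous buckets
theorem pvInsert_bucket {α : Type} (key : α → Int) (x : α) (D : List Int) (g : Int → List α)
    (hD : D.Pairwise (fun a b => b < a))
    (hg : ∀ c ∈ D, ∀ y ∈ g c, key y = c)
    (hk : key x ∉ D → g (key x) = []) :
    PySem.List.insertBy (fun a b => decide (key b < key a)) x (D.flatMap g)
      = (pvInsD (key x) D).flatMap (fun c => if c = key x then g c ++ [x] else g c) := by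
  induction D with
  | nil =>
    have hgk := hk (by simp)
    simp [pvInsD, hgk, PySem.List.insertBy]
  | cons c cs ih =>
    rw [List.pairwise_cons] at hD
    have hcs_lt : ∀ c' ∈ cs, c' < c := hD.1
    have hcong : ∀ (l : List Int), (∀ c' ∈ l, c' ≠ key x) →
        l.flatMap (fun c => if c = key x then g c ++ [x] else g c) = l.flatMap g := by
      intro l hl
      exact List.flatMap_congr (fun c' hc' => by simp [hl c' hc'])
    by_cases h1 : c < key x
    · -- x's key is strictly above every bucket key here: x opens a new front bucket
      have hknotin : key x ∉ c :: cs := by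
        simp only [List.mem_cons]
        rintro (h | h)
        · omega
        · have := hcs_lt _ h; omega
      have hall : ∀ y ∈ (c :: cs).flatMap g, (fun a b => decide (key b < key a)) x y = true := by
        intro y hy
        simp only [List.mem_flatMap] at hy
        obtain ⟨c', hc', hy⟩ := hy
        have hky := hg c' hc' y hy
        simp only [List.mem_cons] at hc'
        simp only [decide_eq_true_eq, hky]
        rcases hc' with h | h
        · omega
        · have := hcs_lt _ h; omega
      rw [pvInsertBy_all_before _ _ _ hall]
      simp only [pvInsD, if_pos h1, List.flatMap_cons, hk hknotin]
      have hcne : c ≠ key x := by omega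
      rw [hcong cs (fun c' hc' he => by have := hcs_lt _ hc'; omega)]
      simp [hcne]
    · by_cases h2 : c = key x
      · -- x joins the existing bucket of its own key, at its end
        have hnot1 : ∀ y ∈ g c, (fun a b => decide (key b < key a)) x y = false := by
          intro y hy
          have := hg c (by simp) y hy
          simp [this, h2]
        rw [List.flatMap_cons, pvInsertBy_append_not _ _ _ _ hnot1]
        have hall : ∀ y ∈ cs.flatMap g, (fun a b => decide (key b < key a)) x y = true := by
          intro y hy
          simp only [List.mem_flatMap] at hy
          obtain ⟨c', hc', hy⟩ := hy
          have h3 := hg c' (by simp [hc']) y hy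
          have h4 := hcs_lt _ hc'
          simp only [decide_eq_true_eq, h3]
          omega
        rw [pvInsertBy_all_before _ _ _ hall]
        simp only [pvInsD, if_neg h1, if_pos h2, List.flatMap_cons]
        rw [hcong cs (fun c' hc' he => by have := hcs_lt _ hc'; subst h2; omega)]
        simp [h2]
      · -- x's key is below this bucket's key: the bucket stays, recurse on the tail
        have hnot1 : ∀ y ∈ g c, (fun a b => decide (key b < key a)) x y = false := by
          intro y hy
          have := hg c (by simp) y hy
          simp only [decide_eq_false_iff_not, this, not_lt]
          omega
        rw [List.flatMap_cons, pvInsertBy_append_not _ _ _ _ hnot1]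
        have hk' : key x ∉ cs → g (key x) = [] := by
          intro h
          refine hk ?_
          simp only [List.mem_cons]
          rintro (he | he)
          · exact h2 he.symm
          · exact h he
        rw [ih hD.2 (fun c' hc' => hg c' (by simp [hc'])) hk']
        simp only [pvInsD, if_neg h1, if_neg h2, List.flatMap_cons]

-- descending list of the distinct key values of xs
def pvDescL {α : Type} (key : α → Int) (xs : List α) : List Int :=
  xs.foldl (fun D x => pvInsD (key x) D) []

theorem pvPairwise_foldl_insD {α : Type} (key : α → Int) (xs : List α) (D : List Int)
    (h : D.Pairwise (fun a b => b < a)) :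
    (xs.foldl (fun D x => pvInsD (key x) D) D).Pairwise (fun a b => b < a) := by
  induction xs generalizing D with
  | nil => exact h
  | cons x t ih => exact ih _ (pvPairwise_insD _ _ h)

theorem pvMem_foldl_insD {α : Type} (key : α → Int) (xs : List α) (D : List Int) (a : Int) :
    a ∈ xs.foldl (fun D x => pvInsD (key x) D) D ↔ a ∈ D ∨ a ∈ xs.map key := by
  induction xs generalizing D with
  | nil => simp
  | cons x t ih =>
    simp only [List.foldl_cons, ih, pvMem_insD, List.map_cons, List.mem_cons]
    tauto

-- the crux: a stable reverse sort by key is the concatenation, over the distinct key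
-- values in descending order, of the original-order sublists at each key value
theorem pvSorted_rev_eq_buckets {α : Type} (key : α → Int) (xs : List α) :
    PySem.List.sorted xs key true
      = (pvDescL key xs).flatMap (fun c => xs.filter (fun x => key x == c)) := by
  induction xs using List.reverseRecOn with
  | nil => rfl
  | append_singleton xs x ih =>
    rw [PySem.List.sorted_rev_eq_foldl_insertBy, List.foldl_append,
      ← PySem.List.sorted_rev_eq_foldl_insertBy, ih]
    simp only [List.foldl_cons, List.foldl_nil]
    rw [pvInsert_bucket key x (pvDescL key xs) _
      (pvPairwise_foldl_insD key xs [] (by simp))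
      (fun c _ y hy => by simpa using (List.mem_filter.1 hy).2)
      (fun hnm => by
        rw [List.filter_eq_nil_iff]
        intro y hy hbeq
        exact hnm ((pvMem_foldl_insD key xs [] (key x)).2
          (Or.inr (by simpa using ⟨y, hy, by simpa using hbeq⟩))))]
    have hD : pvDescL key (xs ++ [x]) = pvInsD (key x) (pvDescL key xs) := by
      simp [pvDescL, List.foldl_append]
    rw [hD]
    refine List.flatMap_congr (fun c _ => ?_)
    rw [List.filter_append]
    by_cases hc : c = key x
    · subst hc
      simp
    · have : (key x == c) = false := by simp [Ne.symm hc]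
      simp [hc, this]

-- B's ranking loop is A's enumerate-and-insert comprehension
theorem pvRank_fold (ws : List String) (d : PySem.Dict String Int) (i : Int) :
    ws.foldl (fun st w => (st.1.insert w st.2, st.2 + 1)) (d, i)
      = ((PySem.List.enumerate ws i).foldl (fun d p => d.insert p.2 p.1) d, i + ws.length) := by
  induction ws generalizing d i with
  | nil => simp
  | cons w t ih =>
    simp only [List.foldl_cons, PySem.List.enumerate_cons, ih]
    refine Prod.ext rfl ?_
    simp only [List.length_cons]
    push_cast; ring

theorem pvFoldl_flatMap {α β σ : Type} (l : List α) (g : α → List β) (f : σ → β → σ) (init : σ) :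
    (l.flatMap g).foldl f init = l.foldl (fun acc c => (g c).foldl f acc) init := by
  induction l generalizing init with
  | nil => rfl
  | cons c t ih => simp only [List.flatMap_cons, List.foldl_append, List.foldl_cons, ih]

theorem pvMain (data : List (List String)) : token_counter data = token_counter_alt data := by
  unfold token_counter token_counter_alt
  have hcnt : data.foldl (fun count sentence =>
      sentence.foldl (fun count w => count.modify w 0 (· + 1)) count) PySem.Dict.empty
      = PySem.Dict.counter data.flatten := by
    rw [PySem.Dict.counter_eq_foldl]
    exact (List.foldl_flatten).symm
  rw [hcnt]
  set toks := data.flatten with htoks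
  set K := PySem.Set.ofList toks with hK
  set κ : String → Int := fun w => (toks.count w : Int) with hκ
  -- A's sort key on the counter's keys is the token count
  have hkey : (fun w => (PySem.Dict.counter toks).getD w 0) = κ :=
    funext fun w => PySem.Dict.getD_counter toks w
  have hitems : (PySem.Dict.counter toks).items = K.map (fun k => (k, κ k)) :=
    PySem.Dict.items_counter toks
  -- B's bucket at c holds exactly the words of count c, in counter (= first-appearance) order
  have hBget : ∀ c : Int,
      ((PySem.Dict.counter toks).items.foldl
        (fun b p => b.modify p.2 [] (fun ws => ws ++ [p.1])) PySem.Dict.empty).getD c []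
      = K.filter (fun w => κ w == c) := by
    intro c
    have h1 : (PySem.Dict.counter toks).items.foldl
        (fun b p => b.modify p.2 [] (fun ws => ws ++ [p.1])) PySem.Dict.empty
        = ((PySem.Dict.counter toks).items.map Prod.swap).foldl
            (fun d p => d.modify p.1 [] (fun ws => ws ++ [p.2])) PySem.Dict.empty := by
      rw [List.foldl_map]
      rfl
    rw [h1, PySem.Dict.getD_foldl_modify_append]
    simp [hitems, List.filter_map, List.map_map, Function.comp_def]
  have hBkeys : ((PySem.Dict.counter toks).items.foldl
      (fun b p => b.modify p.2 [] (fun ws => ws ++ [p.1])) PySem.Dict.empty).keys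
      = PySem.Set.ofList (K.map κ) := by
    have h := PySem.Dict.keys_foldl_modify_key (PySem.Dict.counter toks).items
      (fun p => p.2) ([] : List String) (fun _ p ws => ws ++ [p.1]) PySem.Dict.empty
    have h2 : (PySem.Dict.counter toks).items.map (fun p => p.2) = K.map κ := by
      simp [hitems, List.map_map, Function.comp_def]
    rw [h, h2]
    simp [PySem.Dict.keys_empty]
    rfl
  -- B's sort of the distinct counts is the descending distinct-key list
  have hBsort : PySem.List.sorted (((PySem.Dict.counter toks).items.foldl
      (fun b p => b.modify p.2 [] (fun ws => ws ++ [p.1])) PySem.Dict.empty).keys)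
      (fun c => c) true = pvDescL κ K := by
    apply PySem.List.sorted_rev_eq_of_perm_of_pairwise_gt
    · rw [hBkeys]
      unfold pvDescL
      rw [List.perm_ext_iff_of_nodup
        ((pvPairwise_foldl_insD κ K [] (by simp)).imp (fun h => ne_of_gt h))
        (PySem.Set.nodup_ofList _)]
      intro a
      rw [PySem.Set.mem_ofList]
      rw [pvMem_foldl_insD κ K [] a]
      simp
    · exact pvPairwise_foldl_insD κ K [] (by simp)
  dsimp only
  rw [hkey, PySem.Dict.keys_counter, ← hK, pvSorted_rev_eq_buckets κ K, hBsort]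
  have hcongB : (fun (st : PySem.Dict String Int × Int) (c : Int) =>
      (((PySem.Dict.counter toks).items.foldl
        (fun b p => b.modify p.2 [] (fun ws => ws ++ [p.1])) PySem.Dict.empty).getD c []).foldl
        (fun st w => (st.1.insert w st.2, st.2 + 1)) st)
      = (fun st c => ((K.filter (fun w => κ w == c)).foldl
          (fun st w => (st.1.insert w st.2, st.2 + 1)) st)) := by
    funext st c
    rw [hBget c]
  rw [hcongB, ← pvFoldl_flatMap (pvDescL κ K) (fun c => K.filter (fun w => κ w == c))
    (fun st w => (st.1.insert w st.2, st.2 + 1)) (PySem.Dict.empty, 1),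
    pvRank_fold]

-- ===== VERDICT (by name: the statement is the Claim_ definition above) =====
theorem token_counter_spec : Claim_equal_token_counter := by
  intro data _
  exact pvMain data
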